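-- pv_equiv track=rewrite | github.com/omarfathy7/algorithm-project | Magic Triples/Graph.py | naive_triplets
-- ===== SOURCE A (Python) =====
-- def naive_triplets(a):
--     """Brute-force count for distinct indices (ordered triples)"""
--     n = len(a)
--     cnt = 0
--     for i in range(n):
--         for j in range(n):
--             if j == i:
--                 continue
--             for k in range(n):
--                 if k == i or k == j:
--                     continue
--                 if a[j] * a[j] == a[i] * a[k]:
--                     cnt += 1
--     return cnt
-- ===== SOURCE B (Python) =====
-- def naive_triplets(a):
--     """Count ordered distinct-index triples with a[j]^2 == a[i]*a[k],
--     via a precomputed counter of squares: for each ordered pair (i,k),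
--     count middles j with a[j]^2 == a[i]*a[k], excluding j == i and j == k."""
--     sq = {}
--     for x in a:
--         sq[x * x] = sq.get(x * x, 0) + 1
--     n = len(a)
--     cnt = 0
--     for i in range(n):
--         for k in range(n):
--             if k == i:
--                 continue
--             p = a[i] * a[k]
--             c = sq.get(p, 0)
--             if a[i] * a[i] == p:
--                 c -= 1
--             if a[k] * a[k] == p:
--                 c -= 1
--             cnt += c
--     return cnt
-- ===== Notes on version B (the rewrite author's own statement) =====
-- stated objective: faster
-- what changed: Replaced A's cubic scan over all (i,j,k) by a precomputed dict counting squares, then a double loop over (i,k) that gets the number of valid middles j in one lookup and subtracts the overlaps j=i and j=k.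
import Mathlib
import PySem

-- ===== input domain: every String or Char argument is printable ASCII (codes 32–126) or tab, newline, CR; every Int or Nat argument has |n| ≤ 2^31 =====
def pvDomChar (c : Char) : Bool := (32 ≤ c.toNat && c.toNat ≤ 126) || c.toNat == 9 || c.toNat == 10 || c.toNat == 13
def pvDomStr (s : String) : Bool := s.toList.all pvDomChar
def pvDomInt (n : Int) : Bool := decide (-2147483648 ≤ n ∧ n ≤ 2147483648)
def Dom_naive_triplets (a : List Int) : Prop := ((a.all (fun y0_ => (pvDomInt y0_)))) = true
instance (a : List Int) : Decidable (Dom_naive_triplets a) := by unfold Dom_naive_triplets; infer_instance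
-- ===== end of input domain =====

-- B replaces A's cubic triple loop by a precomputed counter of squares and a double loop
-- over (i,k) that counts the valid middles j by lookup (objective: faster).

-- ===== PORT A =====
def naive_triplets (a : List Int) : Int :=
  let n : Int := a.length
  (PySem.List.pyRange 0 n 1).foldl (fun cnt i =>
    (PySem.List.pyRange 0 n 1).foldl (fun cnt j =>
      if j == i then cnt
      else
        (PySem.List.pyRange 0 n 1).foldl (fun cnt k =>
          if k == i || k == j then cnt
          else if PySem.List.pyGetD a j 0 * PySem.List.pyGetD a j 0 ==
                  PySem.List.pyGetD a i 0 * PySem.List.pyGetD a k 0 then cnt + 1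
          else cnt) cnt) cnt) 0

-- ===== PORT B =====
def naive_triplets_alt (a : List Int) : Int :=
  let sq : PySem.Dict Int Int :=
    a.foldl (fun d x => d.insert (x * x) (d.getD (x * x) 0 + 1)) PySem.Dict.empty
  let n : Int := a.length
  (PySem.List.pyRange 0 n 1).foldl (fun cnt i =>
    (PySem.List.pyRange 0 n 1).foldl (fun cnt k =>
      if k == i then cnt
      else
        let p := PySem.List.pyGetD a i 0 * PySem.List.pyGetD a k 0
        let c0 := sq.getD p 0
        let c1 := if PySem.List.pyGetD a i 0 * PySem.List.pyGetD a i 0 == p then c0 - 1 else c0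
        let c2 := if PySem.List.pyGetD a k 0 * PySem.List.pyGetD a k 0 == p then c1 - 1 else c1
        cnt + c2) cnt) 0

-- ===== PRECONDITION & SPEC =====
def Spec_naive_triplets (a : List Int) (out : Int) : Prop := out = naive_triplets_alt a
instance (a : List Int) (out : Int) : Decidable (Spec_naive_triplets a out) := by unfold Spec_naive_triplets; infer_instance

-- ===== CLAIM (what is proved, stated in full; the proofs are below) =====
def Claim_equal_naive_triplets : Prop := ∀ (a : List Int), Dom_naive_triplets a → Spec_naive_triplets a (naive_triplets a)

-- ===== LEMMAS AND PROOFS =====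

-- the indicator of one valid triple: distinct indices i,j,k with a[j]^2 = a[i]*a[k]
def pvC (a : List Int) (i j k : Int) : Int :=
  if j ≠ i ∧ k ≠ i ∧ k ≠ j ∧
     PySem.List.pyGetD a j 0 * PySem.List.pyGetD a j 0 =
     PySem.List.pyGetD a i 0 * PySem.List.pyGetD a k 0 then 1 else 0

-- the common index range of both programs
def pvR (a : List Int) : List Int := PySem.List.pyRange 0 (a.length : Int) 1

-- A's innermost k-loop is an accumulator plus a 0/1-sum
lemma pvA_inner (a : List Int) (i j cnt : Int) :
    (pvR a).foldl (fun cnt k =>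
        if k == i || k == j then cnt
        else if PySem.List.pyGetD a j 0 * PySem.List.pyGetD a j 0 ==
                PySem.List.pyGetD a i 0 * PySem.List.pyGetD a k 0 then cnt + 1
        else cnt) cnt
    = cnt + ((pvR a).map (fun k =>
        if k = i ∨ k = j then 0
        else if PySem.List.pyGetD a j 0 * PySem.List.pyGetD a j 0 =
                PySem.List.pyGetD a i 0 * PySem.List.pyGetD a k 0 then 1 else 0)).sum := by
  refine (PySem.List.foldl_congr_mem _ _ _ _ ?_).trans (PySem.List.foldl_add _ _ _)
  intro acc x _
  simp only [beq_iff_eq, Bool.or_eq_true]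
  split_ifs <;> omega

-- A's middle j-loop: accumulator plus the double sum of triple indicators
lemma pvA_mid (a : List Int) (i cnt : Int) :
    (pvR a).foldl (fun cnt j =>
      if j == i then cnt
      else
        (pvR a).foldl (fun cnt k =>
          if k == i || k == j then cnt
          else if PySem.List.pyGetD a j 0 * PySem.List.pyGetD a j 0 ==
                  PySem.List.pyGetD a i 0 * PySem.List.pyGetD a k 0 then cnt + 1
          else cnt) cnt) cnt
    = cnt + ((pvR a).map (fun j => ((pvR a).map (fun k => pvC a i j k)).sum)).sum := by
  refine (PySem.List.foldl_congr_mem _ _ _ _ ?_).trans (PySem.List.foldl_add _ _ _)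
  · intro acc j _
    by_cases hji : j = i
    · rw [if_pos (by simp [hji])]
      have : ∀ k, pvC a i j k = 0 := by
        intro k; simp [pvC, hji]
      simp [this]
    · rw [if_neg (by simp [hji])]
      rw [pvA_inner]
      congr 1
      refine congrArg List.sum (List.map_congr_left (fun k _ => ?_))
      simp only [pvC]
      split_ifs <;> first | rfl | omega

-- A as a triple sum over the index range, i outermost then j then k
lemma pvA_sum (a : List Int) :
    naive_triplets a =
      ((pvR a).map (fun i => ((pvR a).map (fun j =>
        ((pvR a).map (fun k => pvC a i j k)).sum)).sum)).sum := by
  show (pvR a).foldl _ 0 = _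
  refine ((PySem.List.foldl_congr_mem _ _ _ _ ?_).trans (PySem.List.foldl_add _ _ _)).trans (by ring)
  intro acc i _
  exact pvA_mid a i acc

-- B's counter of squares looked up at p is the number of j with a[j]^2 = p
lemma pvSq (a : List Int) (p : Int) :
    (a.foldl (fun d x => d.insert (x * x) (d.getD (x * x) 0 + 1))
        (PySem.Dict.empty : PySem.Dict Int Int)).getD p 0
      = (a.countP (fun x => x * x == p) : Int) := by
  rw [show a.foldl (fun d x => d.insert (x * x) (d.getD (x * x) 0 + 1))
        (PySem.Dict.empty : PySem.Dict Int Int)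
      = (a.map (fun x => x * x)).foldl (fun d y => d.insert y (d.getD y 0 + 1))
        (PySem.Dict.empty : PySem.Dict Int Int) from (List.foldl_map (f := fun x : Int => x * x)
        (g := fun d y => PySem.Dict.insert d y (PySem.Dict.getD d y 0 + 1))).symm]
  rw [PySem.Dict.getD_foldl_insert_add_one]
  rw [PySem.Dict.getD_empty, zero_add]
  congr 1
  simp only [List.count, List.countP_map]
  refine List.countP_congr ?_
  intro x _
  show ((fun y => y == p) ∘ (fun y => y * y)) x = true ↔ (x * x == p) = true
  simp

-- that same count, written as a 0/1-sum over the index range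
lemma pvCountSum (a : List Int) (p : Int) :
    ((pvR a).map (fun j => if PySem.List.pyGetD a j 0 * PySem.List.pyGetD a j 0 = p
        then (1:Int) else 0)).sum
      = (a.countP (fun x => x * x == p) : Int) := by
  have h1 : (pvR a).map (fun j => if PySem.List.pyGetD a j 0 * PySem.List.pyGetD a j 0 = p
        then (1:Int) else 0)
      = ((pvR a).map (fun j => PySem.List.pyGetD a j 0)).map
          (fun x => if (fun y => y * y == p) x = true then (1:Int) else 0) := by
    rw [List.map_map]
    exact List.map_congr_left (fun j _ => by
      by_cases h : PySem.List.pyGetD a j 0 * PySem.List.pyGetD a j 0 = p <;> simp [h])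
  rw [h1, show (pvR a).map (fun j => PySem.List.pyGetD a j 0) = a from
        PySem.List.map_pyGetD_pyRange_zero' a 0]
  exact PySem.List.sum_map_ite_one_zero _ a

-- dropping the two excluded positions i ≠ k from a 0/1-sum subtracts their indicators
lemma pvSumEraseTwo (s : Finset Int) (i k : Int) (hi : i ∈ s) (hk : k ∈ s) (hik : k ≠ i)
    (P : Int → Prop) [DecidablePred P] :
    (∑ j ∈ s, if j ≠ i ∧ j ≠ k ∧ P j then (1:Int) else 0)
    = (∑ j ∈ s, if P j then (1:Int) else 0) - (if P i then 1 else 0) - (if P k then 1 else 0) := by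
  have hks : k ∈ s.erase i := Finset.mem_erase.mpr ⟨hik, hk⟩
  have h1 : ∑ j ∈ s, (if j ≠ i ∧ j ≠ k ∧ P j then (1:Int) else 0)
      = ∑ j ∈ (s.erase i).erase k, (if P j then (1:Int) else 0) := by
    rw [← Finset.sum_subset (Finset.Subset.trans (Finset.erase_subset _ _) (Finset.erase_subset _ _))
      (fun x hx hnx => ?_)]
    · exact Finset.sum_congr rfl (fun j hj => by
        rcases Finset.mem_erase.mp hj with ⟨hjk, hj'⟩
        rcases Finset.mem_erase.mp hj' with ⟨hji, _⟩
        simp [hjk, hji])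
    · by_cases hxi : x = i
      · simp [hxi]
      · have hxk : x = k := by
          by_contra hxk
          exact hnx (Finset.mem_erase.mpr ⟨hxk, Finset.mem_erase.mpr ⟨hxi, hx⟩⟩)
        simp [hxk]
  rw [h1, ← Finset.add_sum_erase s _ hi, ← Finset.add_sum_erase (s.erase i) _ hks]
  ring

lemma pvC_eq (a : List Int) (i j k : Int) (hki : k ≠ i) :
    pvC a i j k = if j ≠ i ∧ j ≠ k ∧
        PySem.List.pyGetD a j 0 * PySem.List.pyGetD a j 0 =
        PySem.List.pyGetD a i 0 * PySem.List.pyGetD a k 0 then 1 else 0 := by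
  unfold pvC
  refine if_congr ?_ rfl rfl
  constructor
  · rintro ⟨h1, _, h3, h4⟩; exact ⟨h1, fun h => h3 h.symm, h4⟩
  · rintro ⟨h1, h2, h3⟩; exact ⟨h1, hki, fun h => h2 h.symm, h3⟩

-- B's per-(i,k) value (count minus the two self corrections) is the j-sum of indicators
lemma pvPair (a : List Int) (i k : Int) (hi : i ∈ pvR a) (hk : k ∈ pvR a) (hki : k ≠ i) :
    (a.countP (fun x => x * x == PySem.List.pyGetD a i 0 * PySem.List.pyGetD a k 0) : Int)
      - (if PySem.List.pyGetD a i 0 * PySem.List.pyGetD a i 0 =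
            PySem.List.pyGetD a i 0 * PySem.List.pyGetD a k 0 then 1 else 0)
      - (if PySem.List.pyGetD a k 0 * PySem.List.pyGetD a k 0 =
            PySem.List.pyGetD a i 0 * PySem.List.pyGetD a k 0 then 1 else 0)
    = ((pvR a).map (fun j => pvC a i j k)).sum := by
  have hnd : (pvR a).Nodup := PySem.List.nodup_pyRange_one 0 ((a.length : Int))
  rw [← pvCountSum a (PySem.List.pyGetD a i 0 * PySem.List.pyGetD a k 0)]
  rw [show (pvR a).map (fun j => pvC a i j k)
        = (pvR a).map (fun j => if j ≠ i ∧ j ≠ k ∧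
            PySem.List.pyGetD a j 0 * PySem.List.pyGetD a j 0 =
            PySem.List.pyGetD a i 0 * PySem.List.pyGetD a k 0 then (1:Int) else 0) from
      List.map_congr_left (fun j _ => pvC_eq a i j k hki)]
  rw [← List.sum_toFinset _ hnd, ← List.sum_toFinset _ hnd]
  exact (pvSumEraseTwo (pvR a).toFinset i k (List.mem_toFinset.mpr hi)
    (List.mem_toFinset.mpr hk) hki _).symm

-- B's inner k-loop: accumulator plus the double sum, k outermost then j
lemma pvB_mid (a : List Int) (i cnt : Int) (hi : i ∈ pvR a)
    (sq : PySem.Dict Int Int)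
    (hsq : sq = a.foldl (fun d x => d.insert (x * x) (d.getD (x * x) 0 + 1)) PySem.Dict.empty) :
    (pvR a).foldl (fun cnt k =>
      if k == i then cnt
      else
        let p := PySem.List.pyGetD a i 0 * PySem.List.pyGetD a k 0
        let c0 := sq.getD p 0
        let c1 := if PySem.List.pyGetD a i 0 * PySem.List.pyGetD a i 0 == p then c0 - 1 else c0
        let c2 := if PySem.List.pyGetD a k 0 * PySem.List.pyGetD a k 0 == p then c1 - 1 else c1
        cnt + c2) cnt
    = cnt + ((pvR a).map (fun k => ((pvR a).map (fun j => pvC a i j k)).sum)).sum := by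
  refine (PySem.List.foldl_congr_mem _ _
      (fun cnt k => cnt + ((pvR a).map (fun j => pvC a i j k)).sum) _ ?_).trans
    (PySem.List.foldl_add _ _ _)
  intro acc k hkmem
  by_cases hki : k = i
  · rw [if_pos (by simp [hki])]
    have hz : ∀ j, pvC a i j k = 0 := by
      intro j; simp [pvC, hki]
    simp [hz]
  · rw [if_neg (by simp [hki])]
    simp only [hsq, pvSq, beq_iff_eq]
    rw [← pvPair a i k hi hkmem hki]
    split_ifs <;> ring

-- B as a triple sum over the index range, i outermost then k then j
lemma pvB_sum (a : List Int) :
    naive_triplets_alt a =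
      ((pvR a).map (fun i => ((pvR a).map (fun k =>
        ((pvR a).map (fun j => pvC a i j k)).sum)).sum)).sum := by
  show (pvR a).foldl _ 0 = _
  refine ((PySem.List.foldl_congr_mem _ _ _ _ ?_).trans (PySem.List.foldl_add _ _ _)).trans (by ring)
  intro acc i hi
  exact pvB_mid a i acc hi _ rfl

-- the two inner sums commute
lemma pvSwap (a : List Int) (i : Int) :
    ((pvR a).map (fun j => ((pvR a).map (fun k => pvC a i j k)).sum)).sum =
    ((pvR a).map (fun k => ((pvR a).map (fun j => pvC a i j k)).sum)).sum := by
  have hnd : (pvR a).Nodup := PySem.List.nodup_pyRange_one 0 ((a.length : Int))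
  simp only [← List.sum_toFinset _ hnd]
  exact Finset.sum_comm

-- ===== VERDICT (by name: the statement is the Claim_ definition above) =====
theorem naive_triplets_spec : Claim_equal_naive_triplets := by
  intro a _
  show naive_triplets a = naive_triplets_alt a
  rw [pvA_sum, pvB_sum]
  exact congrArg List.sum (List.map_congr_left (fun i _ => pvSwap a i))
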